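-- pv_equiv track=rewrite | github.com/MrBrantCode/unitest_baseline | mut_generate/mist_train_taco/taco_15032/solution.py | can_frogs_communicate
-- ===== SOURCE A (Python) =====
-- def can_frogs_communicate(N, K, P, coordinates, pairs):
--     # Sort the coordinates along with their original indices
--     L = sorted([(coordinates[i], i + 1) for i in range(N)])
--
--     # Initialize the helper array
--     H = [0] * (N + 1)
--
--     # Determine the group each frog belongs to based on communication distance K
--     x = L[0][0]
--     hf = L[0][1]
--     H[hf] = hf
--
--     for k in range(1, N):
--         nx = L[k][0]
--         f = L[k][1]
--         if nx - x > K: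
--             hf = f
--         H[f] = hf
--         x = nx
--
--     # Determine if each pair can communicate
--     results = []
--     for A, B in pairs:
--         if H[A] == H[B]:
--             results.append("Yes")
--         else:
--             results.append("No")
--
--     return results
-- ===== SOURCE B (Python) =====
-- def can_frogs_communicate(N, K, P, coordinates, pairs):
--     # Union-find over frog indices 0..N; union adjacent sorted frogs with gap <= K,
--     # then answer each query by comparing roots.
--     order = sorted((coordinates[i], i + 1) for i in range(N))
--     parent = list(range(N + 1))
--
--     def find(i):
--         while parent[i] != i:
--             i = parent[i]
--         return i
--
--     for (c0, f0), (c1, f1) in zip(order, order[1:]):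
--         if c1 - c0 <= K:
--             parent[find(f1)] = find(f0)
--
--     return ["Yes" if find(a) == find(b) else "No" for a, b in pairs]
-- ===== Notes on version B (the rewrite author's own statement) =====
-- stated objective: alternative
-- what changed: Replaces A's leader-label helper array filled by a stateful scan over the sorted frogs with a union-find (disjoint-set) parent array: adjacent sorted frogs with gap <= K are unioned and each query is answered by comparing find-roots.
import Mathlib
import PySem

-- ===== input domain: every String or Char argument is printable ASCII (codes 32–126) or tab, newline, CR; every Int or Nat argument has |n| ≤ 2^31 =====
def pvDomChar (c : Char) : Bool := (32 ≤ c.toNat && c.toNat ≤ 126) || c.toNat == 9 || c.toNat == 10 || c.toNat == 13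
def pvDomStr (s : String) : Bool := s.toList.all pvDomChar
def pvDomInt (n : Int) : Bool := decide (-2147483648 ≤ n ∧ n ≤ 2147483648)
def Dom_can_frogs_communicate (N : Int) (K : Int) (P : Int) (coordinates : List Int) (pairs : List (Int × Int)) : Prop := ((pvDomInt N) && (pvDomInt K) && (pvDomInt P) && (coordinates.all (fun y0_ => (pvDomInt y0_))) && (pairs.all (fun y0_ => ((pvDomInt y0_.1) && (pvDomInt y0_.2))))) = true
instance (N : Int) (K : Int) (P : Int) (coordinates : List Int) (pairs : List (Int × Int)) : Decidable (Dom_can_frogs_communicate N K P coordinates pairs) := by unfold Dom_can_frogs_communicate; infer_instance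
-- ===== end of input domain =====

-- B replaces A's leader-label helper array, filled by a stateful scan over the sorted frogs,
-- with a union-find (disjoint-set) over frog indices that unions adjacent sorted frogs with
-- gap ≤ K and answers each query by comparing roots (objective: alternative, same cost).

-- ===== PORT A =====
-- Python sorts the (coordinate, index) tuples lexicographically; since the second components
-- 1..N are strictly increasing in input order, the STABLE sort by first component is exact here.
-- A's loop body, named for the fold: state (x, hf, H), element (nx, f).
def pvAStep (K : Int) (st : Int × Int × List Int) (e : Int × Int) : Int × Int × List Int :=
  let nx := e.1
  let f := e.2
  let hf := if nx - st.1 > K then f else st.2.1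
  (nx, hf, PySem.List.pySetD st.2.2 f hf)

def can_frogs_communicate (N : Int) (K : Int) (P : Int) (coordinates : List Int) (pairs : List (Int × Int)) : List String :=
  let L := PySem.List.sorted ((PySem.List.pyRange 0 N 1).map (fun i => (PySem.List.pyGetD coordinates i 0, i + 1))) (fun t => t.1) false
  let H0 : List Int := List.replicate (N + 1).toNat 0      -- [0] * (N + 1)
  let h0 := PySem.List.pyGetD L 0 (0, 0)                   -- L[0]  (N ≥ 1 under Pre_)
  let x := h0.1
  let hf := h0.2
  let H1 := PySem.List.pySetD H0 hf hf
  let st := (PySem.List.pyRange 1 N 1).foldl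
      (fun st k => pvAStep K st (PySem.List.pyGetD L k (0, 0))) (x, hf, H1)
  let H := st.2.2
  pairs.map (fun p => if PySem.List.pyGetD H p.1 0 = PySem.List.pyGetD H p.2 0 then "Yes" else "No")

-- ===== PORT B =====
-- Source B's find: chase parents until a fixpoint; the fuel bounds the while loop (parent chains
-- in this usage have height ≤ 1, so the fuel N+2 is never exhausted under Pre_); pyGetD gives
-- parent[i] Python's indexing (negative indices count from the end) on the inputs Pre_ admits.
def pvFind (fuel : Nat) (parent : List Int) (i : Int) : Int :=
  match fuel with
  | 0 => i
  | fuel + 1 =>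
    let p := PySem.List.pyGetD parent i 0
    if p ≠ i then pvFind fuel parent p else i

-- Source B's union loop body: element ((c0, f0), (c1, f1)) from zip(order, order[1:]).
def pvBStep (K : Int) (N : Int) (d : List Int) (e : (Int × Int) × (Int × Int)) : List Int :=
  if e.2.1 - e.1.1 ≤ K then PySem.List.pySetD d (pvFind (N + 2).toNat d e.2.2) (pvFind (N + 2).toNat d e.1.2) else d

def can_frogs_communicate_alt (N : Int) (K : Int) (P : Int) (coordinates : List Int) (pairs : List (Int × Int)) : List String :=
  let order := PySem.List.sorted ((PySem.List.pyRange 0 N 1).map (fun i => (PySem.List.pyGetD coordinates i 0, i + 1))) (fun t => t.1) false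
  let parent0 : List Int := PySem.List.pyRange 0 (N + 1) 1                 -- list(range(N + 1))
  let parent := (order.zip (order.drop 1)).foldl (pvBStep K N) parent0     -- order[1:] = drop 1, exact on lists
  pairs.map (fun p => if pvFind (N + 2).toNat parent p.1 = pvFind (N + 2).toNat parent p.2 then "Yes" else "No")

-- ===== PRECONDITION & SPEC =====
-- Pre_ excludes exactly the inputs on which A raises: N < 1 or N > len(coordinates)
-- (IndexError on L[0] resp. coordinates[i]) and query pairs with a component outside
-- [-(N+1), N], the valid Python indices of the length-(N+1) helper array (IndexError).
def Pre_can_frogs_communicate (N : Int) (K : Int) (P : Int) (coordinates : List Int) (pairs : List (Int × Int)) : Prop :=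
  1 ≤ N ∧ N ≤ (coordinates.length : Int) ∧
    ∀ p ∈ pairs, -(N + 1) ≤ p.1 ∧ p.1 ≤ N ∧ -(N + 1) ≤ p.2 ∧ p.2 ≤ N
instance (N : Int) (K : Int) (P : Int) (coordinates : List Int) (pairs : List (Int × Int)) : Decidable (Pre_can_frogs_communicate N K P coordinates pairs) := by unfold Pre_can_frogs_communicate; infer_instance

def pvWitness_can_frogs_communicate : Int × Int × Int × List Int × (List (Int × Int)) :=
  (3, 2, 1, [10, 1, 3], [(1, 2), (1, 3), (2, 3), (0, 0), (-1, 2)])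

def Spec_can_frogs_communicate (N : Int) (K : Int) (P : Int) (coordinates : List Int) (pairs : List (Int × Int)) (out : List String) : Prop := out = can_frogs_communicate_alt N K P coordinates pairs
instance (N : Int) (K : Int) (P : Int) (coordinates : List Int) (pairs : List (Int × Int)) (out : List String) : Decidable (Spec_can_frogs_communicate N K P coordinates pairs out) := by unfold Spec_can_frogs_communicate; infer_instance

-- ===== CLAIM (what is proved, stated in full; the proofs are below) =====
def Claim_equal_can_frogs_communicate : Prop := ∀ (N : Int) (K : Int) (P : Int) (coordinates : List Int) (pairs : List (Int × Int)), Dom_can_frogs_communicate N K P coordinates pairs → Pre_can_frogs_communicate N K P coordinates pairs → Spec_can_frogs_communicate N K P coordinates pairs (can_frogs_communicate N K P coordinates pairs)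

-- ===== LEMMAS AND PROOFS =====

-- the value the parent array holds at a (non-negative, in-range) index
def pvVal (d : List Int) (i : Int) : Int := PySem.List.pyGetD d i 0

theorem pvGetSet (H : List Int) (j i v : Int)
    (h0j : 0 ≤ j) (hj : j < (H.length : Int)) (h0i : 0 ≤ i) (hi : i < (H.length : Int)) :
    PySem.List.pyGetD (PySem.List.pySetD H j v) i 0
      = if i = j then v else PySem.List.pyGetD H i 0 := by
  rw [PySem.List.pySetD_of_nonneg H v h0j]
  rw [PySem.List.pyGetD_eq_getElem _ 0 h0i (by simpa using hi)]
  rw [List.getElem_set]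
  by_cases h : i = j
  · rw [if_pos (by omega : j.toNat = i.toNat), if_pos h]
  · rw [if_neg (by omega : ¬ j.toNat = i.toNat), if_neg h, PySem.List.pyGetD_eq_getElem _ 0 h0i hi]

theorem length_pvSet (H : List Int) (j v : Int) :
    (PySem.List.pySetD H j v).length = H.length := PySem.List.length_pySetD ..

theorem pvFind_of_root (n : Nat) (d : List Int) (i : Int)
    (h : pvVal d (pvVal d i) = pvVal d i) : pvFind (n + 2) d i = pvVal d i := by
  unfold pvFind
  by_cases hi : pvVal d i = i
  · simp [pvVal] at hi ⊢
    simp [hi]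
  · simp only [pvVal] at hi ⊢
    simp only [hi, ne_eq, not_false_iff, if_true]
    unfold pvFind
    simp only [pvVal] at h
    simp [h]

theorem pvFind_fix (n : Nat) (d : List Int) (i : Int) (h : pvVal d i = i) :
    pvFind (n + 1) d i = i := by
  unfold pvFind
  simp only [pvVal] at h
  simp [h]

-- Python's negative indexing: xs[c] = xs[c + len(xs)] for -len ≤ c < 0
theorem pvWrap (xs : List Int) (c : Int) (h1 : -(xs.length : Int) ≤ c) (h2 : c < 0) :
    PySem.List.pyGetD xs c 0 = PySem.List.pyGetD xs (c + xs.length) 0 := by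
  obtain ⟨k, hk⟩ : ∃ k : Nat, c = -(k : Int) := ⟨(-c).toNat, by omega⟩
  subst hk
  rw [PySem.List.pyGetD_neg_natCast xs k 0 (by omega) (by omega)]
  rw [PySem.List.pyGetD_eq_getElem _ 0 (by omega) (by omega)]
  congr 1
  omega

-- the initial parent array list(range(N+1)) maps every in-range index to itself
theorem pvVal_init (N : Int) (i : Int) (h0 : 0 ≤ i) (h1 : i ≤ N) :
    pvVal (PySem.List.pyRange 0 (N + 1) 1) i = i := by
  unfold pvVal
  rw [PySem.List.pyGetD_eq_getElem _ 0 h0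
    (by rw [PySem.List.length_pyRange_one]; omega)]
  rw [PySem.List.getElem_pyRange_one]
  omega

-- both loop bodies preserve the length of the array they carry
theorem pvAStep_len (K : Int) (l : List (Int × Int)) :
    ∀ st : Int × Int × List Int, ((l.foldl (pvAStep K) st).2.2).length = st.2.2.length := by
  induction l with
  | nil => intro st; rfl
  | cons r rs ih =>
    intro st
    rw [List.foldl_cons, ih]
    dsimp only [pvAStep]
    rw [length_pvSet]

theorem pvBStep_len (K N : Int) (l : List ((Int × Int) × (Int × Int))) :
    ∀ d : List Int, (l.foldl (pvBStep K N) d).length = d.length := by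
  induction l with
  | nil => intro d; rfl
  | cons r rs ih =>
    intro d
    rw [List.foldl_cons, ih]
    dsimp only [pvBStep]
    split
    · rw [length_pvSet]
    · rfl

-- main loop invariant: running A's fold over `rest` (with previous element `prev`, leader `hf`,
-- helper array `H`) and B's fold over zip (prev :: rest) rest (with parent array `d`) keeps the
-- helper array and the parent array in step on all already-seen indices, which are all roots
-- lying in [0, N].
theorem pvLoop (K N : Int) (rest : List (Int × Int)) :
    ∀ (prev : Int × Int) (hf : Int) (H : List Int) (d : List Int) (done : List Int),
    (∀ f ∈ rest.map Prod.snd, 1 ≤ f ∧ f ≤ N ∧ f ∉ done ∧ f ≠ prev.2) →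
    (rest.map Prod.snd).Nodup →
    (1 ≤ prev.2 ∧ prev.2 ≤ N) →
    H.length = (N + 1).toNat →
    d.length = (N + 1).toNat →
    (∀ i, (i = 0 ∨ i ∈ done ∨ i = prev.2) →
        PySem.List.pyGetD H i 0 = pvVal d i ∧ pvVal d (pvVal d i) = pvVal d i ∧
        (pvVal d i = 0 ∨ pvVal d i ∈ done ∨ pvVal d i = prev.2)) →
    (hf = pvVal d prev.2) →
    (∀ f ∈ rest.map Prod.snd, pvVal d f = f) →
    (∀ x ∈ done, 0 ≤ x ∧ x ≤ N) →
    (∀ i, (i = 0 ∨ i ∈ done ∨ i = prev.2 ∨ i ∈ rest.map Prod.snd) →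
        PySem.List.pyGetD (rest.foldl (pvAStep K) (prev.1, hf, H)).2.2 i 0
          = pvVal (((prev :: rest).zip rest).foldl (pvBStep K N) d) i ∧
        pvVal (((prev :: rest).zip rest).foldl (pvBStep K N) d)
            (pvVal (((prev :: rest).zip rest).foldl (pvBStep K N) d) i)
          = pvVal (((prev :: rest).zip rest).foldl (pvBStep K N) d) i ∧
        0 ≤ pvVal (((prev :: rest).zip rest).foldl (pvBStep K N) d) i ∧
        pvVal (((prev :: rest).zip rest).foldl (pvBStep K N) d) i ≤ N) := by
  induction rest with
  | nil =>
    intro prev hf H d done hsub hnd hfr hH hdl hag hhf hto hdone i hi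
    simp only [List.map_nil, List.not_mem_nil, or_false] at hi
    simp only [List.zip_nil_right, List.foldl_nil]
    obtain ⟨h1, h2, h3⟩ := hag i hi
    refine ⟨h1, h2, ?_, ?_⟩
    · rcases h3 with h | h | h
      · omega
      · have := hdone _ h; omega
      · omega
    · rcases h3 with h | h | h
      · omega
      · have := hdone _ h; omega
      · omega
  | cons r rs ih =>
    intro prev hf H d done hsub hnd hfr hH hdl hag hhf hto hdone i hi
    have hNge : 1 ≤ N := by have := hfr; omega
    obtain ⟨hr1, hrN, hrdone, hrprev⟩ := hsub r.2 (by simp)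
    have hvr : pvVal d r.2 = r.2 := hto r.2 (by simp)
    have hndc : r.2 ∉ rs.map Prod.snd ∧ (rs.map Prod.snd).Nodup := by
      simpa using hnd
    obtain ⟨m, hm⟩ : ∃ m, (N + 2).toNat = m + 2 := ⟨(N + 2).toNat - 2, by omega⟩
    have hfind2 : pvFind (N + 2).toNat d r.2 = r.2 := by
      rw [hm, pvFind_of_root m d r.2 (by rw [hvr, hvr]), hvr]
    have hcovprev : (prev.2 = 0 ∨ prev.2 ∈ done ∨ prev.2 = prev.2) := Or.inr (Or.inr rfl)
    have hfind1 : pvFind (N + 2).toNat d prev.2 = hf := by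
      rw [hm, pvFind_of_root m d prev.2 (hag prev.2 hcovprev).2.1, ← hhf]
    have hhfcov : hf = 0 ∨ hf ∈ done ∨ hf = prev.2 := by
      have h := (hag prev.2 hcovprev).2.2
      rwa [← hhf] at h
    have hhfroot : pvVal d hf = hf := by
      rw [hhf]
      exact (hag prev.2 hcovprev).2.1
    have hhfne : hf ≠ r.2 := by
      rcases hhfcov with h | h | h
      · omega
      · intro he; exact hrdone (he ▸ h)
      · omega
    have hHlen : (H.length : Int) = N + 1 := by omega
    have hdlen : (d.length : Int) = N + 1 := by omega
    have hcast : ∀ i' : Int, i' = 0 ∨ i' ∈ done ∨ i' = prev.2 → 0 ≤ i' ∧ i' < N + 1 := by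
      intro i' h
      rcases h with h | h | h
      · omega
      · have := hdone i' h; omega
      · omega
    have hzip : ((prev :: r :: rs).zip (r :: rs)) = (prev, r) :: ((r :: rs).zip rs) := rfl
    rw [hzip, List.foldl_cons, List.foldl_cons]
    by_cases hK : r.1 - prev.1 ≤ K
    · -- gap ≤ K: A keeps the leader, B unions r.2 into hf's class
      have hstepB : pvBStep K N d (prev, r) = PySem.List.pySetD d r.2 hf := by
        dsimp only [pvBStep]
        rw [if_pos hK, hfind2, hfind1]
      have hstepA : pvAStep K (prev.1, hf, H) r = (r.1, hf, PySem.List.pySetD H r.2 hf) := by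
        dsimp only [pvAStep]
        rw [if_neg (by omega)]
      rw [hstepA, hstepB]
      have hvd : ∀ j, 0 ≤ j → j < N + 1 →
          pvVal (PySem.List.pySetD d r.2 hf) j = if j = r.2 then hf else pvVal d j := by
        intro j b0 b1
        exact pvGetSet d r.2 j hf (by omega) (by omega) b0 (by omega)
      refine ih r hf (PySem.List.pySetD H r.2 hf) (PySem.List.pySetD d r.2 hf) (prev.2 :: done)
        ?_ hndc.2 ⟨hr1, hrN⟩ (by rw [length_pvSet]; exact hH) (by rw [length_pvSet]; exact hdl)
        ?_ ?_ ?_ ?_ i ?_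
      · intro f hf'
        obtain ⟨a1, a2, a3, a4⟩ := hsub f (by simp [hf'])
        refine ⟨a1, a2, ?_, ?_⟩
        · simp only [List.mem_cons, not_or]; exact ⟨a4, a3⟩
        · intro he; exact hndc.1 (he ▸ hf')
      · intro i' hi'
        by_cases hir : i' = r.2
        · subst hir
          rw [pvGetSet H r.2 r.2 hf (by omega) (by omega) (by omega) (by omega), if_pos rfl,
            hvd r.2 (by omega) (by omega), if_pos rfl]
          have hhfb := hcast hf hhfcov
          rw [hvd hf hhfb.1 hhfb.2, if_neg hhfne]
          refine ⟨rfl, hhfroot, ?_⟩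
          rcases hhfcov with h | h | h
          · exact Or.inl h
          · exact Or.inr (Or.inl (List.mem_cons_of_mem _ h))
          · exact Or.inr (Or.inl (h ▸ List.mem_cons_self ..))
        · have hold : i' = 0 ∨ i' ∈ done ∨ i' = prev.2 := by
            rcases hi' with h | h | h
            · exact Or.inl h
            · rcases List.mem_cons.mp h with h' | h'
              · exact Or.inr (Or.inr h')
              · exact Or.inr (Or.inl h')
            · exact absurd h hir
          obtain ⟨hg, hcl, hcv⟩ := hag i' hold
          obtain ⟨b0, b1⟩ := hcast i' hold
          have hvne : pvVal d i' ≠ r.2 := by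
            rcases hcv with h | h | h
            · omega
            · intro he; exact hrdone (he ▸ h)
            · omega
          obtain ⟨c0, c1⟩ := hcast (pvVal d i') hcv
          rw [pvGetSet H r.2 i' hf (by omega) (by omega) b0 (by omega), if_neg hir,
            hvd i' b0 b1, if_neg hir, hvd (pvVal d i') c0 c1, if_neg hvne]
          refine ⟨hg, hcl, ?_⟩
          rcases hcv with h | h | h
          · exact Or.inl h
          · exact Or.inr (Or.inl (List.mem_cons_of_mem _ h))
          · exact Or.inr (Or.inl (h ▸ List.mem_cons_self ..))
      · rw [hvd r.2 (by omega) (by omega), if_pos rfl]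
      · intro f hf'
        obtain ⟨a1, a2, _, _⟩ := hsub f (by simp [hf'])
        have hne : f ≠ r.2 := by intro he; exact hndc.1 (he ▸ hf')
        rw [hvd f (by omega) (by omega), if_neg hne]
        exact hto f (by simp [hf'])
      · intro x hx
        rcases List.mem_cons.mp hx with h | h
        · omega
        · exact hdone x h
      · simp only [List.map_cons, List.mem_cons] at hi ⊢
        rcases hi with h | h | h | h | h
        · exact Or.inl h
        · exact Or.inr (Or.inl (Or.inr h))
        · exact Or.inr (Or.inl (Or.inl h))
        · exact Or.inr (Or.inr (Or.inl h))
        · exact Or.inr (Or.inr (Or.inr h))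
    · -- gap > K: A starts a new leader r.2, B does not union
      have hstepB : pvBStep K N d (prev, r) = d := by
        dsimp only [pvBStep]
        rw [if_neg hK]
      have hstepA : pvAStep K (prev.1, hf, H) r = (r.1, r.2, PySem.List.pySetD H r.2 r.2) := by
        dsimp only [pvAStep]
        rw [if_pos (by omega)]
      rw [hstepA, hstepB]
      refine ih r r.2 (PySem.List.pySetD H r.2 r.2) d (prev.2 :: done)
        ?_ hndc.2 ⟨hr1, hrN⟩ (by rw [length_pvSet]; exact hH) hdl
        ?_ hvr.symm ?_ ?_ i ?_
      · intro f hf'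
        obtain ⟨a1, a2, a3, a4⟩ := hsub f (by simp [hf'])
        refine ⟨a1, a2, ?_, ?_⟩
        · simp only [List.mem_cons, not_or]; exact ⟨a4, a3⟩
        · intro he; exact hndc.1 (he ▸ hf')
      · intro i' hi'
        by_cases hir : i' = r.2
        · subst hir
          rw [pvGetSet H r.2 r.2 r.2 (by omega) (by omega) (by omega) (by omega), if_pos rfl]
          exact ⟨hvr.symm, by rw [hvr, hvr], Or.inr (Or.inr hvr)⟩
        · have hold : i' = 0 ∨ i' ∈ done ∨ i' = prev.2 := by
            rcases hi' with h | h | h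
            · exact Or.inl h
            · rcases List.mem_cons.mp h with h' | h'
              · exact Or.inr (Or.inr h')
              · exact Or.inr (Or.inl h')
            · exact absurd h hir
          obtain ⟨hg, hcl, hcv⟩ := hag i' hold
          obtain ⟨b0, b1⟩ := hcast i' hold
          rw [pvGetSet H r.2 i' r.2 (by omega) (by omega) b0 (by omega), if_neg hir]
          refine ⟨hg, hcl, ?_⟩
          rcases hcv with h | h | h
          · exact Or.inl h
          · exact Or.inr (Or.inl (List.mem_cons_of_mem _ h))
          · exact Or.inr (Or.inl (h ▸ List.mem_cons_self ..))
      · intro f hf'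
        exact hto f (by simp [hf'])
      · intro x hx
        rcases List.mem_cons.mp hx with h | h
        · omega
        · exact hdone x h
      · simp only [List.map_cons, List.mem_cons] at hi ⊢
        rcases hi with h | h | h | h | h
        · exact Or.inl h
        · exact Or.inr (Or.inl (Or.inr h))
        · exact Or.inr (Or.inl (Or.inl h))
        · exact Or.inr (Or.inr (Or.inl h))
        · exact Or.inr (Or.inr (Or.inr h))

theorem pvGetRep (n : Nat) (i : Int) (h0 : 0 ≤ i) (h1 : i < (n : Int)) :
    PySem.List.pyGetD (List.replicate n (0 : Int)) i 0 = 0 := by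
  rw [PySem.List.pyGetD_eq_getElem _ 0 h0 (by simpa using h1)]
  simp

theorem main_lemma (N K P : Int) (coordinates : List Int) (pairs : List (Int × Int))
    (hpre : Pre_can_frogs_communicate N K P coordinates pairs) :
    can_frogs_communicate N K P coordinates pairs = can_frogs_communicate_alt N K P coordinates pairs := by
  obtain ⟨hN, hNlen, hpairs⟩ := hpre
  simp only [can_frogs_communicate, can_frogs_communicate_alt]
  set base := (PySem.List.pyRange 0 N 1).map (fun i => (PySem.List.pyGetD coordinates i 0, i + 1)) with hbase
  set L := PySem.List.sorted base (fun t => t.1) false with hLdef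
  have hLlen : L.length = N.toNat := by
    rw [hLdef, PySem.List.length_sorted, hbase, List.length_map, PySem.List.length_pyRange_one]
    omega
  obtain ⟨l0, rest, hL⟩ := List.exists_cons_of_ne_nil
    (show L ≠ [] by intro h; rw [h] at hLlen; simp at hLlen; omega)
  have hsnd : (L.map Prod.snd).Perm ((PySem.List.pyRange 0 N 1).map (fun i => i + 1)) := by
    have h2 := (PySem.List.sorted_perm base (fun t => t.1) false).map Prod.snd
    rw [hbase] at h2
    simpa [List.map_map, Function.comp] using h2
  have hmemL : ∀ f : Int, f ∈ L.map Prod.snd ↔ (1 ≤ f ∧ f ≤ N) := by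
    intro f
    rw [hsnd.mem_iff]
    simp only [List.mem_map, PySem.List.mem_pyRange_one]
    constructor
    · rintro ⟨i, ⟨h1, h2⟩, rfl⟩; omega
    · intro h; exact ⟨f - 1, ⟨by omega, by omega⟩, by omega⟩
  have hndL : (L.map Prod.snd).Nodup := by
    refine hsnd.nodup_iff.mpr ?_
    exact (PySem.List.nodup_pyRange_one 0 N).map (fun a b h => by omega)
  have hl02 : 1 ≤ l0.2 ∧ l0.2 ≤ N := by
    refine (hmemL l0.2).mp ?_
    rw [hL]; simp
  have hget0 : PySem.List.pyGetD L 0 ((0 : Int), (0 : Int)) = l0 := by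
    rw [hL, PySem.List.pyGetD_zero_cons]
  have hrestmem : ∀ f ∈ rest.map Prod.snd, 1 ≤ f ∧ f ≤ N := by
    intro f hf
    refine (hmemL f).mp ?_
    rw [hL]; simp [hf]
  have hndrest : ((l0.2 : Int) ∉ rest.map Prod.snd) ∧ (rest.map Prod.snd).Nodup := by
    rw [hL] at hndL; simpa using hndL
  -- the A-side fold over indices 1..N-1 is the fold over the tail of L
  have hNL : N = (L.length : Int) := by omega
  have hfoldA : ∀ (init : Int × Int × List Int),
      (PySem.List.pyRange 1 N 1).foldl
        (fun st k => pvAStep K st (PySem.List.pyGetD L k ((0 : Int), (0 : Int)))) init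
        = rest.foldl (pvAStep K) init := by
    intro init
    rw [hNL, PySem.List.foldl_pyRange_pyGetD' L ((0 : Int), (0 : Int)) (pvAStep K) init (by norm_num)]
    rw [hL]
    rfl
  set H0 : List Int := List.replicate (N + 1).toNat 0 with hH0
  have hH0len : (H0.length : Int) = N + 1 := by rw [hH0, List.length_replicate]; omega
  set H1 := PySem.List.pySetD H0 l0.2 l0.2 with hH1
  set parent0 : List Int := PySem.List.pyRange 0 (N + 1) 1 with hparent0
  have hp0len : parent0.length = (N + 1).toNat := by
    rw [hparent0, PySem.List.length_pyRange_one]; omega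
  have hp0 : ∀ i, 0 ≤ i → i ≤ N → pvVal parent0 i = i := by
    intro i h0 h1
    rw [hparent0]
    exact pvVal_init N i h0 h1
  have key := pvLoop K N rest l0 l0.2 H1 parent0 []
    (by intro f hf
        refine ⟨(hrestmem f hf).1, (hrestmem f hf).2, by simp, ?_⟩
        intro h; exact hndrest.1 (h ▸ hf))
    hndrest.2
    hl02
    (by rw [hH1, length_pvSet, hH0, List.length_replicate])
    hp0len
    (by intro i hi
        rcases hi with hi | hi | hi
        · subst hi
          have hne : (0 : Int) ≠ l0.2 := by omega
          rw [hH1, pvGetSet H0 l0.2 0 l0.2 (by omega) (by omega) le_rfl (by omega),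
            if_neg hne, hp0 0 le_rfl (by omega), hp0 0 le_rfl (by omega)]
          refine ⟨pvGetRep _ 0 le_rfl (by omega), rfl, Or.inl rfl⟩
        · simp at hi
        · subst hi
          rw [hH1, pvGetSet H0 l0.2 l0.2 l0.2 (by omega) (by omega) (by omega) (by omega),
            if_pos rfl, hp0 l0.2 (by omega) (by omega), hp0 l0.2 (by omega) (by omega)]
          exact ⟨rfl, rfl, Or.inr (Or.inr rfl)⟩)
    (by rw [hp0 l0.2 (by omega) (by omega)])
    (by intro f hf'; exact hp0 f (by have := hrestmem f hf'; omega) (hrestmem f hf').2)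
    (by intro x hx; simp at hx)
  obtain ⟨m, hm⟩ : ∃ m, (N + 2).toNat = m + 2 := ⟨(N + 2).toNat - 2, by omega⟩
  rw [hget0]
  rw [hfoldA (l0.1, l0.2, H1)]
  rw [show L.zip (L.drop 1) = (l0 :: rest).zip rest by rw [hL]; rfl]
  set Hf := (rest.foldl (pvAStep K) (l0.1, l0.2, H1)).2.2 with hHf
  set pf := (((l0 :: rest).zip rest).foldl (pvBStep K N) parent0) with hpf
  have hHflen : (Hf.length : Int) = N + 1 := by
    rw [hHf, pvAStep_len]
    dsimp only
    rw [hH1, length_pvSet]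
    exact hH0len
  have hpflen : (pf.length : Int) = N + 1 := by
    rw [hpf, pvBStep_len]
    omega
  have cov : ∀ c : Int, 0 ≤ c → c ≤ N →
      (c = 0 ∨ c ∈ ([] : List Int) ∨ c = l0.2 ∨ c ∈ rest.map Prod.snd) := by
    intro c h1 h2
    by_cases hc : c = 0
    · exact Or.inl hc
    · have : c ∈ L.map Prod.snd := (hmemL c).mpr ⟨by omega, h2⟩
      rw [hL] at this
      simp only [List.map_cons, List.mem_cons] at this
      tauto
  -- per query component: both programs compute the root of the (wrapped) index
  have handle : ∀ c : Int, -(N + 1) ≤ c → c ≤ N →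
      ∃ v, PySem.List.pyGetD Hf c 0 = v ∧ pvFind (N + 2).toNat pf c = v := by
    intro c hc1 hc2
    by_cases hc : 0 ≤ c
    · obtain ⟨hg, hcl, _, _⟩ := key c (cov c hc hc2)
      exact ⟨pvVal pf c, hg, by rw [hm, pvFind_of_root m pf c hcl]⟩
    · -- negative index: Python wraps to c + (N+1)
      have hcw : 0 ≤ c + (N + 1) ∧ c + (N + 1) ≤ N := by omega
      obtain ⟨hg, hcl, hb0, hbN⟩ := key (c + (N + 1)) (cov _ hcw.1 hcw.2)
      refine ⟨pvVal pf (c + (N + 1)), ?_, ?_⟩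
      · rw [pvWrap Hf c (by omega) (by omega), show c + (Hf.length : Int) = c + (N + 1) by omega]
        exact hg
      · rw [hm]
        show pvFind (m + 1 + 1) pf c = _
        unfold pvFind
        have hpv : PySem.List.pyGetD pf c 0 = pvVal pf (c + (N + 1)) := by
          rw [pvWrap pf c (by omega) (by omega), show c + (pf.length : Int) = c + (N + 1) by omega]
          rfl
        rw [hpv]
        rw [if_pos (by omega : pvVal pf (c + (N + 1)) ≠ c)]
        exact pvFind_fix m pf _ hcl
  refine List.map_congr_left ?_
  intro p hp
  obtain ⟨hp1, hp2, hp3, hp4⟩ := hpairs p hp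
  obtain ⟨v1, ha1, hb1⟩ := handle p.1 hp1 hp2
  obtain ⟨v2, ha2, hb2⟩ := handle p.2 hp3 hp4
  rw [ha1, ha2, hb1, hb2]

-- ===== VERDICT (by name: the statement is the Claim_ definition above) =====
theorem can_frogs_communicate_spec : Claim_equal_can_frogs_communicate := by
  intro N K P coordinates pairs _ hpre
  unfold Spec_can_frogs_communicate
  exact main_lemma N K P coordinates pairs hpre
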